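-- pv_equiv track=rewrite | github.com/farodoc/Algorithms-and-Data-Structures-AGH-UST | Graph algorithms/equivalent_letters.py | equivalent_letters
-- ===== SOURCE A (Python) =====
-- class Node:
--     def __init__(self, value):
--         self.value = value
--         self.parent = self
--
-- def make_set(val):
--     return Node(val)
--
-- def find(x):
--     if x != x.parent:
--         x.parent = find(x.parent)
--
--     return x.parent
--
-- def union(x, y):
--     x = find(x)
--     y = find(y)
--
--     if x.value == y.value:
--         return
--
--     if x.value < y.value:
--         y.parent = x
--
--     else:
--         x.parent = y
--
-- def equivalent_letters(A, B, C):
--     letters = []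
--     values = []
--
--     for i in range(len(A)):
--         if A[i] not in values:
--             values.append(A[i])
--             letters.append(make_set(A[i]))
--
--         if B[i] not in values:
--             values.append(B[i])
--             letters.append(make_set(B[i]))
--
--
--     for i in range(len(A)):
--         a = letters[values.index(A[i])]
--         b = letters[values.index(B[i])]
--
--         union(a, b)
--
--
--     new_word = ""
--     for i in range(len(C)):
--         if C[i] in values:
--             x = find(letters[values.index(C[i])]).value
--             new_word += x
--
--         else:
--             new_word += C[i]
--
--     return new_word
-- ===== SOURCE B (Python) =====
-- def equivalent_letters(A, B, C):
--     # Merge letters into explicit connected components (lists of sets) instead of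
--     # union-find trees; each letter maps to the minimum of its component.
--     comps = []
--     for a, b in zip(A, B):
--         ga = next((g for g in comps if a in g), None)
--         gb = next((g for g in comps if b in g), None)
--         if ga is None and gb is None:
--             comps.append({a, b})
--         elif ga is None:
--             comps = [g for g in comps if g is not gb] + [{a} | gb]
--         elif gb is None:
--             comps = [g for g in comps if g is not ga] + [ga | {b}]
--         elif ga is not gb:
--             comps = [g for g in comps if g is not ga and g is not gb] + [ga | gb]
--     rep = {}
--     for g in comps:
--         m = min(g)
--         for ch in g:
--             rep[ch] = m
--     return "".join(rep.get(ch, ch) for ch in C)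
-- ===== Notes on version B (the rewrite author's own statement) =====
-- stated objective: alternative
-- what changed: Replaces the union-find forest (parent pointers, recursive find with path compression, value-ordered union) by explicitly maintained connected-component sets merged per letter pair, with a single min-of-component dictionary built at the end.
-- outside the precondition, e.g. on equivalent_letters('a', '', 'ab'): A raises IndexError, B returns 'ab'
import Mathlib
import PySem

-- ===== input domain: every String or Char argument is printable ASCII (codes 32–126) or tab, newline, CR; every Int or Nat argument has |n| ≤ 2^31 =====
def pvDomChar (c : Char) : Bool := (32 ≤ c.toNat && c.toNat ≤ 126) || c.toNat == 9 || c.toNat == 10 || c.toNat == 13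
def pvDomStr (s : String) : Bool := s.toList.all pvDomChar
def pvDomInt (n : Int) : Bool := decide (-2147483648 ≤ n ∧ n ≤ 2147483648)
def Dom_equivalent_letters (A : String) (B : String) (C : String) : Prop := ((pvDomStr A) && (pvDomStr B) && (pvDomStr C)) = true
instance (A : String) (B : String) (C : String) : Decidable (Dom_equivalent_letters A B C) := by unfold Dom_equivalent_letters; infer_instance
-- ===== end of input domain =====

-- B replaces A's union-find trees by explicit connected-component sets with a min-of-component map;
-- objective: alternative (a structurally different algorithm for the same exact result).

-- ===== PORT A =====
-- Nodes of A's union-find are identified by their `value` field: the `values` list holds distinct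
-- letters, so Python object identity coincides with value equality; the mutable `parent` pointers
-- become a dict value ↦ parent value.  `find`'s recursion (with path compression) is ported with a
-- fuel argument; fuel = (number of nodes)+1 always suffices because parent values strictly decrease
-- along a chain (proved in `findA_spec` below), so the port computes exactly what Python computes.
def findA (fuel : Nat) (par : PySem.Dict Char Char) (x : Char) : PySem.Dict Char Char × Char :=
  match fuel with
  | 0 => (par, par.getD x x)
  | fuel + 1 =>
    let p := par.getD x x
    if p = x then (par, x)
    else
      let pr := findA fuel par p
      (pr.1.insert x pr.2, pr.2)

def unionA (fuel : Nat) (par : PySem.Dict Char Char) (a b : Char) : PySem.Dict Char Char :=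
  let fa := findA fuel par a
  let fb := findA fuel fa.1 b
  if fa.2 = fb.2 then fb.1
  else if fa.2 < fb.2 then fb.1.insert fb.2 fa.2
  else fb.1.insert fa.2 fb.2

-- one `if X not in values: values.append(X); letters.append(make_set(X))` step
def step1A (s : List Char × PySem.Dict Char Char) (c : Char) : List Char × PySem.Dict Char Char :=
  if c ∈ s.1 then s else (s.1 ++ [c], s.2.insert c c)

def loop1A (al bl : List Char) : List Char × PySem.Dict Char Char :=
  (PySem.List.pyRange 0 al.length 1).foldl
    (fun s i => step1A (step1A s ((PySem.List.pyGet? al i).getD ' ')) ((PySem.List.pyGet? bl i).getD ' '))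
    ([], PySem.Dict.empty)

def loop2A (al bl : List Char) (par : PySem.Dict Char Char) : PySem.Dict Char Char :=
  (PySem.List.pyRange 0 al.length 1).foldl
    (fun par i => unionA (par.size + 1) par ((PySem.List.pyGet? al i).getD ' ') ((PySem.List.pyGet? bl i).getD ' '))
    par

def step3A (values : List Char) (s : PySem.Dict Char Char × List Char) (c : Char) :
    PySem.Dict Char Char × List Char :=
  if c ∈ values then
    let fr := findA (s.1.size + 1) s.1 c
    (fr.1, s.2 ++ [fr.2])
  else (s.1, s.2 ++ [c])

def loop3A (values : List Char) (cl : List Char) (par : PySem.Dict Char Char) :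
    PySem.Dict Char Char × List Char :=
  (PySem.List.pyRange 0 cl.length 1).foldl
    (fun s i => step3A values s ((PySem.List.pyGet? cl i).getD ' ')) (par, [])

def equivalent_letters (A : String) (B : String) (C : String) : String :=
  let vp := loop1A A.toList B.toList
  String.ofList (loop3A vp.1 C.toList (loop2A A.toList B.toList vp.2)).2

-- ===== PORT B =====
-- one merge step of Source B's loop; `g is not ga` is ported as inequality of the component sets,
-- which is exact because distinct live components are disjoint and nonempty, hence unequal
def bstep (comps : List (PySem.Set Char)) (a b : Char) : List (PySem.Set Char) :=
  match comps.find? (fun g => PySem.Set.contains g a), comps.find? (fun g => PySem.Set.contains g b) with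
  | none, none => comps ++ [PySem.Set.ofList [a, b]]
  | none, some gb => comps.filter (fun g => !(g == gb)) ++ [PySem.Set.union (PySem.Set.ofList [a]) gb]
  | some ga, none => comps.filter (fun g => !(g == ga)) ++ [PySem.Set.union ga (PySem.Set.ofList [b])]
  | some ga, some gb =>
    if ga = gb then comps
    else comps.filter (fun g => !(g == ga || g == gb)) ++ [PySem.Set.union ga gb]

-- min(g) on a nonempty set of letters is PySem.List.min?; the inner `for ch in g` writes the same
-- value for every element of g and rep is only looked up afterwards, so set order is irrelevant
def equivalent_letters_alt (A : String) (B : String) (C : String) : String :=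
  let comps := (A.toList.zip B.toList).foldl (fun comps e => bstep comps e.1 e.2) []
  let rep := comps.foldl
    (fun (rep : PySem.Dict Char Char) g =>
      let m := (PySem.List.min? g id).getD ' '
      g.foldl (fun rep ch => rep.insert ch m) rep)
    PySem.Dict.empty
  String.ofList (C.toList.map (fun ch => rep.getD ch ch))

-- ===== PRECONDITION & SPEC =====
-- Pre_ excludes exactly the inputs with len(B) < len(A), on which A raises IndexError (B[i] is
-- read for every i < len(A)); A returns normally on all other inputs.
def Pre_equivalent_letters (A : String) (B : String) (C : String) : Prop :=
  A.toList.length ≤ B.toList.length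
instance (A : String) (B : String) (C : String) : Decidable (Pre_equivalent_letters A B C) := by
  unfold Pre_equivalent_letters; infer_instance

def pvWitness_equivalent_letters : String × String × String := ("ab", "ba", "abc")

def Spec_equivalent_letters (A : String) (B : String) (C : String) (out : String) : Prop :=
  out = equivalent_letters_alt A B C
instance (A : String) (B : String) (C : String) (out : String) :
    Decidable (Spec_equivalent_letters A B C out) := by
  unfold Spec_equivalent_letters; infer_instance

-- ===== CLAIM (what is proved, stated in full; the proofs are below) =====
def Claim_equal_equivalent_letters : Prop :=
  ∀ (A : String) (B : String) (C : String), Dom_equivalent_letters A B C →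
    Pre_equivalent_letters A B C → Spec_equivalent_letters A B C (equivalent_letters A B C)

-- ===== LEMMAS AND PROOFS =====

-- minimum of a component (Source B's min(g))
def mnOf (g : List Char) : Char := (PySem.List.min? g id).getD ' '

-- disjointness of two components
def Disj (g h : List Char) : Prop := ∀ c ∈ g, c ∉ h

-- the representative a letter is mapped to: the minimum of its component, itself if uncovered
def repOf (comps : List (List Char)) (y : Char) : Char :=
  match comps.find? (fun g => PySem.Set.contains g y) with
  | some g => mnOf g
  | none => y

-- well-formed component lists: nonempty, duplicate-free, over V, pairwise disjoint
def CompsWF (V : List Char) (comps : List (List Char)) : Prop :=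
  (∀ g ∈ comps, g ≠ [] ∧ g.Nodup ∧ ∀ c ∈ g, c ∈ V) ∧ comps.Pairwise Disj

-- the simulation invariant between A's parent dict and B's component list:
-- parent chains decrease, agree with the component minima, and roots are exactly the minima
def SimInv (V : List Char) (par : PySem.Dict Char Char) (comps : List (List Char)) : Prop :=
  V.Nodup ∧ par.keys = V ∧ CompsWF V comps ∧
  ∀ x ∈ V,
    par.getD x x ∈ V ∧
    repOf comps (par.getD x x) = repOf comps x ∧
    repOf comps x ≤ par.getD x x ∧
    par.getD x x ≤ x ∧
    (par.getD x x = x ↔ x = repOf comps x)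

-- the number of letters of V smaller than x: bounds the recursion depth of find
def cnt (V : List Char) (x : Char) : Nat := V.countP (fun y => decide (y < x))

-- state of A's first loop: distinct letters in order, identity parent dict
def Inv0 (s : List Char × PySem.Dict Char Char) : Prop :=
  s.1.Nodup ∧ s.2.keys = s.1 ∧ ∀ x ∈ s.1, s.2.getD x x = x



lemma min?_cons_isSome (f : Option Char → Char → Option Char)
    (hf : ∀ o x, (f (some o) x).isSome) :
    ∀ (t : List Char) (o : Char), (t.foldl f (some o)).isSome := by
  intro t
  induction t with
  | nil => intro o; simp
  | cons x t ih =>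
    intro o
    have := hf o x
    simp only [List.foldl_cons]
    rcases Option.isSome_iff_exists.mp this with ⟨m, hm⟩
    rw [hm]; exact ih m

lemma min?_isSome {g : List Char} (h : g ≠ []) : (PySem.List.min? g id).isSome := by
  cases g with
  | nil => simp at h
  | cons a t =>
    simp only [PySem.List.min?]
    exact min?_cons_isSome _ (by intro o x; dsimp; split <;> simp) t a

lemma mnOf_mem {g : List Char} (h : g ≠ []) : mnOf g ∈ g := by
  rcases Option.isSome_iff_exists.mp (min?_isSome h) with ⟨m, hm⟩
  have := PySem.List.min?_mem hm
  simpa [mnOf, hm] using this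

lemma mnOf_le {g : List Char} {c : Char} (hc : c ∈ g) : mnOf g ≤ c := by
  rcases Option.isSome_iff_exists.mp (min?_isSome (List.ne_nil_of_mem hc)) with ⟨m, hm⟩
  have := PySem.List.min?_isMin hm c hc
  simpa [mnOf, hm] using this

lemma mnOf_eq_of {g : List Char} {m : Char} (hm : m ∈ g) (hle : ∀ c ∈ g, m ≤ c) : mnOf g = m :=
  le_antisymm (mnOf_le hm) (hle _ (mnOf_mem (List.ne_nil_of_mem hm)))

lemma find?_none_iff {comps : List (List Char)} {c : Char} :
    comps.find? (fun g => PySem.Set.contains g c) = none ↔ ∀ g ∈ comps, c ∉ g := by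
  rw [List.find?_eq_none]
  constructor
  · intro h g hg hc; exact h g hg (by simpa [PySem.Set.contains_iff] using hc)
  · intro h g hg hc; exact h g hg (by simpa [PySem.Set.contains_iff] using hc)

lemma find?_some_facts {comps : List (List Char)} {c : Char} {g : List Char}
    (h : comps.find? (fun g => PySem.Set.contains g c) = some g) : g ∈ comps ∧ c ∈ g :=
  ⟨List.mem_of_find?_eq_some h, by simpa [PySem.Set.contains_iff] using List.find?_some h⟩

lemma disj_symm : Symmetric Disj := by
  intro g h hgh c hch hcg; exact hgh c hcg hch

lemma find?_unique {comps : List (List Char)} {c : Char} {g : List Char}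
    (hdisj : comps.Pairwise Disj) (hg : g ∈ comps) (hc : c ∈ g) :
    comps.find? (fun h => PySem.Set.contains h c) = some g := by
  cases hfind : comps.find? (fun h => PySem.Set.contains h c) with
  | none => exact absurd hc (find?_none_iff.mp hfind g hg)
  | some g' =>
    obtain ⟨hg', hcg'⟩ := find?_some_facts hfind
    by_cases hee : g' = g
    · rw [hee]
    · exact absurd hcg' (hdisj.forall disj_symm hg hg' (fun he => hee he.symm) c hc)

lemma repOf_of_mem {comps : List (List Char)} {c : Char} {g : List Char}
    (hdisj : comps.Pairwise Disj) (hg : g ∈ comps) (hc : c ∈ g) :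
    repOf comps c = mnOf g := by
  unfold repOf
  rw [find?_unique hdisj hg hc]

lemma repOf_of_not_mem {comps : List (List Char)} {c : Char}
    (h : ∀ g ∈ comps, c ∉ g) : repOf comps c = c := by
  unfold repOf
  rw [find?_none_iff.mpr h]

lemma repOf_le {V : List Char} {comps : List (List Char)} (hWF : CompsWF V comps) (y : Char) :
    repOf comps y ≤ y := by
  unfold repOf
  cases hfind : comps.find? (fun g => PySem.Set.contains g y) with
  | none => exact le_rfl
  | some g =>
    obtain ⟨hg, hyg⟩ := find?_some_facts hfind
    exact mnOf_le hyg

lemma repOf_mem_V {V : List Char} {comps : List (List Char)} (hWF : CompsWF V comps)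
    {y : Char} (hy : y ∈ V) : repOf comps y ∈ V := by
  unfold repOf
  cases hfind : comps.find? (fun g => PySem.Set.contains g y) with
  | none => exact hy
  | some g =>
    obtain ⟨hg, hyg⟩ := find?_some_facts hfind
    exact (hWF.1 g hg).2.2 _ (mnOf_mem (hWF.1 g hg).1)

lemma repOf_idem {V : List Char} {comps : List (List Char)} (hWF : CompsWF V comps) (y : Char) :
    repOf comps (repOf comps y) = repOf comps y := by
  unfold repOf
  cases hfind : comps.find? (fun g => PySem.Set.contains g y) with
  | none => rw [hfind]
  | some g =>
    obtain ⟨hg, hyg⟩ := find?_some_facts hfind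
    simp only [hfind]
    rw [find?_unique hWF.2 hg (mnOf_mem (hWF.1 g hg).1)]

lemma countP_lt_of_mem {α : Type} {l : List α} {p q : α → Bool}
    (hmono : ∀ y ∈ l, p y = true → q y = true) {a : α} (ha : a ∈ l)
    (hqa : q a = true) (hpa : p a = false) : l.countP p < l.countP q := by
  induction l with
  | nil => simp at ha
  | cons x t ih =>
    rcases List.mem_cons.mp ha with rfl | hat
    · rw [List.countP_cons, List.countP_cons, hqa, hpa]
      simp only [decide_true, decide_false, if_true, if_false, add_zero, Nat.add_zero, reduceIte]
      exact Nat.lt_succ_of_le (List.countP_mono_left (fun y hy h => hmono y (List.mem_cons_of_mem _ hy) h))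
    · rw [List.countP_cons, List.countP_cons]
      have hstep := ih (fun y hy h => hmono y (List.mem_cons_of_mem _ hy) h) hat
      have himp := hmono x (List.mem_cons_self)
      cases hpx : p x <;> cases hqx : q x <;> simp_all <;> omega

lemma cnt_lt {V : List Char} {p x : Char} (hp : p ∈ V) (hpx : p < x) : cnt V p < cnt V x := by
  exact countP_lt_of_mem (fun y _ h => by
      simp only [decide_eq_true_eq] at *; exact lt_trans h hpx) hp
    (by simpa using hpx) (by simp)

lemma cnt_lt_fuel {V : List Char} (x : Char) : cnt V x < V.length + 1 :=
  Nat.lt_succ_of_le List.countP_le_length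

lemma SimInv_insert_root {V : List Char} {par : PySem.Dict Char Char} {comps : List (List Char)}
    (h : SimInv V par comps) {x : Char} (hx : x ∈ V) :
    SimInv V (par.insert x (repOf comps x)) comps := by
  obtain ⟨hnd, hkeys, hWF, hcl⟩ := h
  have hcont : par.contains x = true := (PySem.Dict.contains_iff_mem_keys par x).mpr (hkeys ▸ hx)
  refine ⟨hnd, by rw [PySem.Dict.keys_insert_of_contains par _ hcont, hkeys], hWF, ?_⟩
  intro y hy
  rw [PySem.Dict.getD_insert]
  by_cases hyx : y = x
  · subst hyx
    simp only [if_pos rfl]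
    exact ⟨repOf_mem_V hWF hy, repOf_idem hWF y, le_rfl, repOf_le hWF y,
      ⟨fun h => h.symm, fun h => h.symm⟩⟩
  · simp only [if_neg hyx]
    exact hcl y hy

lemma findA_spec {V : List Char} {comps : List (List Char)} :
    ∀ (fuel : Nat) (par : PySem.Dict Char Char) (x : Char), SimInv V par comps → x ∈ V →
      cnt V x < fuel →
      (findA fuel par x).2 = repOf comps x ∧ SimInv V (findA fuel par x).1 comps := by
  intro fuel
  induction fuel with
  | zero => intro par x _ _ hf; omega
  | succ fuel ih =>
    intro par x hInv hx hf
    obtain ⟨hpV, hrep, hle1, hle2, hiff⟩ := hInv.2.2.2 x hx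
    by_cases hroot : par.getD x x = x
    · have hxr : x = repOf comps x := hiff.mp hroot
      simp only [findA, if_pos hroot]
      exact ⟨hxr, hInv⟩
    · have hplt : par.getD x x < x := lt_of_le_of_ne hle2 hroot
      have hcnt : cnt V (par.getD x x) < fuel := by
        have := cnt_lt hpV hplt
        omega
      obtain ⟨hr, hInv'⟩ := ih par (par.getD x x) hInv hpV hcnt
      simp only [findA, if_neg hroot]
      refine ⟨by rw [hr, hrep], ?_⟩
      rw [hr, hrep]
      exact SimInv_insert_root hInv' hx

lemma compsWF_filter_append {V : List Char} {comps : List (List Char)} {p : List Char → Bool}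
    {merged : List Char} (hWF : CompsWF V comps)
    (h1 : merged ≠ []) (h2 : merged.Nodup) (h3 : ∀ c ∈ merged, c ∈ V)
    (hdisj : ∀ g, g ∈ comps → p g = true → Disj g merged) :
    CompsWF V (comps.filter p ++ [merged]) := by
  constructor
  · intro g hg
    rcases List.mem_append.mp hg with hg | hg
    · exact hWF.1 g (List.mem_of_mem_filter hg)
    · rcases List.mem_singleton.mp hg with rfl
      exact ⟨h1, h2, h3⟩
  · rw [List.pairwise_append]
    refine ⟨hWF.2.sublist List.filter_sublist, List.pairwise_singleton _ _, ?_⟩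
    intro g hg m hm
    rcases List.mem_singleton.mp hm with rfl
    obtain ⟨hgc, hgp⟩ := List.mem_filter.mp hg
    exact hdisj g hgc hgp

-- uncovered letters stay uncovered by kept blocks
lemma uncov_filter {comps : List (List Char)} {p : List Char → Bool} {y : Char}
    (h : ∀ g ∈ comps, y ∉ g) : ∀ g ∈ comps.filter p, y ∉ g :=
  fun g hg => h g (List.mem_of_mem_filter hg)

-- a covered letter's minimum is in its own block, hence differs from anything outside it
lemma mnOf_ne_of_disjoint {comps : List (List Char)} (hdisj : comps.Pairwise Disj)
    {g h : List Char} (hg : g ∈ comps) (hh : h ∈ comps) (hne : g ≠ h) (hgne : g ≠ [])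
    {c : Char} (hc : c ∈ h) : mnOf g ≠ c := by
  intro he
  exact (hdisj.forall disj_symm hg hh hne) (mnOf g) (mnOf_mem hgne) (he ▸ hc)

lemma bstep_spec {V : List Char} {comps : List (List Char)} (hWF : CompsWF V comps)
    {a b : Char} (ha : a ∈ V) (hb : b ∈ V) :
    CompsWF V (bstep comps a b) ∧
    ∀ y, repOf (bstep comps a b) y =
      if repOf comps y = repOf comps a ∨ repOf comps y = repOf comps b
      then min (repOf comps a) (repOf comps b) else repOf comps y := by
  unfold bstep
  cases hfa : comps.find? (fun g => PySem.Set.contains g a) with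
  | none =>
    have hauncov : ∀ g ∈ comps, a ∉ g := find?_none_iff.mp hfa
    have hra : repOf comps a = a := repOf_of_not_mem hauncov
    cases hfb : comps.find? (fun g => PySem.Set.contains g b) with
    | none =>
      -- both fresh: append {a, b}
      have hbuncov : ∀ g ∈ comps, b ∉ g := find?_none_iff.mp hfb
      have hrb : repOf comps b = b := repOf_of_not_mem hbuncov
      set s : List Char := PySem.Set.ofList [a, b] with hs
      have hmem : ∀ y, y ∈ s ↔ y = a ∨ y = b := by
        intro y; rw [hs]; rw [PySem.Set.mem_ofList]; simp
      have hWF' : CompsWF V (comps ++ [s]) := by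
        have := compsWF_filter_append (p := fun _ => true) (merged := s) hWF
          (by intro h; have := (hmem a).mpr (Or.inl rfl); rw [h] at this; simp at this)
          (PySem.Set.nodup_ofList _)
          (by intro c hc; rcases (hmem c).mp hc with rfl | rfl <;> assumption)
          (by intro g hg _ c hcg hcs
              rcases (hmem c).mp hcs with rfl | rfl
              · exact hauncov g hg hcg
              · exact hbuncov g hg hcg)
        rwa [List.filter_true] at this
      have hmns : mnOf s = min a b := by
        apply mnOf_eq_of
        · rcases min_choice a b with h | h <;> rw [h] <;> exact (hmem _).mpr (by simp)
        · intro c hc; rcases (hmem c).mp hc with rfl | rfl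
          · exact min_le_left _ _
          · exact min_le_right _ _
      refine ⟨hWF', ?_⟩
      intro y
      rw [hra, hrb]
      cases hfy : comps.find? (fun g => PySem.Set.contains g y) with
      | some g =>
        obtain ⟨hg, hyg⟩ := find?_some_facts hfy
        have hRy : repOf comps y = mnOf g := repOf_of_mem hWF.2 hg hyg
        have hR'y : repOf (comps ++ [s]) y = mnOf g :=
          repOf_of_mem hWF'.2 (List.mem_append.mpr (Or.inl hg)) hyg
        have hne1 : mnOf g ≠ a := fun h => hauncov g hg (h ▸ mnOf_mem (hWF.1 g hg).1)
        have hne2 : mnOf g ≠ b := fun h => hbuncov g hg (h ▸ mnOf_mem (hWF.1 g hg).1)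
        rw [hR'y, hRy, if_neg (by rintro (h | h) <;> [exact hne1 h; exact hne2 h])]
      | none =>
        have hyuncov : ∀ g ∈ comps, y ∉ g := find?_none_iff.mp hfy
        have hRy : repOf comps y = y := repOf_of_not_mem hyuncov
        rw [hRy]
        by_cases hy : y = a ∨ y = b
        · rw [if_pos hy]
          have : repOf (comps ++ [s]) y = mnOf s :=
            repOf_of_mem hWF'.2 (List.mem_append.mpr (Or.inr (List.mem_singleton.mpr rfl)))
              ((hmem y).mpr hy)
          rw [this, hmns]
        · rw [if_neg hy]
          exact repOf_of_not_mem (by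
            intro g hg
            rcases List.mem_append.mp hg with hg | hg
            · exact hyuncov g hg
            · rcases List.mem_singleton.mp hg with rfl
              intro hys; exact hy ((hmem y).mp hys))
    | some gb =>
      -- a fresh, b in gb: replace gb by {a} ∪ gb
      obtain ⟨hgbc, hbgb⟩ := find?_some_facts hfb
      obtain ⟨hgbne, hgbnd, hgbV⟩ := hWF.1 gb hgbc
      have hrb : repOf comps b = mnOf gb := repOf_of_mem hWF.2 hgbc hbgb
      set s : List Char := PySem.Set.union (PySem.Set.ofList [a]) gb with hs
      have hmem : ∀ y, y ∈ s ↔ y = a ∨ y ∈ gb := by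
        intro y; rw [hs, PySem.Set.mem_union, PySem.Set.mem_ofList]; simp
      have hkeep : ∀ g, g ∈ comps → (!(g == gb)) = true → Disj g s := by
        intro g hg hp c hcg hcs
        have hgne : g ≠ gb := by simpa using hp
        rcases (hmem c).mp hcs with rfl | hcgb
        · exact hauncov g hg hcg
        · exact (hWF.2.forall disj_symm hg hgbc hgne) c hcg hcgb
      have hWF' : CompsWF V (comps.filter (fun g => !(g == gb)) ++ [s]) :=
        compsWF_filter_append hWF
          (List.ne_nil_of_mem ((hmem a).mpr (Or.inl rfl)))
          (by rw [hs]; exact PySem.Set.nodup_union _ _ (PySem.Set.nodup_ofList _))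
          (by intro c hc
              rcases (hmem c).mp hc with rfl | h
              · exact ha
              · exact hgbV c h)
          hkeep
      have hmns : mnOf s = min a (mnOf gb) := by
        apply mnOf_eq_of
        · rcases min_choice a (mnOf gb) with h | h <;> rw [h]
          · exact (hmem a).mpr (Or.inl rfl)
          · exact (hmem _).mpr (Or.inr (mnOf_mem hgbne))
        · intro c hc; rcases (hmem c).mp hc with rfl | h
          · exact min_le_left _ _
          · exact le_trans (min_le_right _ _) (mnOf_le h)
      have hsmem : s ∈ comps.filter (fun g => !(g == gb)) ++ [s] :=
        List.mem_append.mpr (Or.inr (List.mem_singleton.mpr rfl))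
      refine ⟨hWF', ?_⟩
      intro y
      rw [hra, hrb]
      cases hfy : comps.find? (fun g => PySem.Set.contains g y) with
      | some g =>
        obtain ⟨hg, hyg⟩ := find?_some_facts hfy
        have hRy : repOf comps y = mnOf g := repOf_of_mem hWF.2 hg hyg
        by_cases hggb : g = gb
        · subst hggb
          rw [hRy, if_pos (Or.inr rfl)]
          rw [repOf_of_mem hWF'.2 hsmem ((hmem y).mpr (Or.inr hyg)), hmns]
        · have hkeepg : g ∈ comps.filter (fun g => !(g == gb)) := by
            rw [List.mem_filter]; exact ⟨hg, by simpa using hggb⟩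
          have hR'y : repOf (comps.filter (fun g => !(g == gb)) ++ [s]) y = mnOf g :=
            repOf_of_mem hWF'.2 (List.mem_append.mpr (Or.inl hkeepg)) hyg
          have hne1 : mnOf g ≠ a := fun h => hauncov g hg (h ▸ mnOf_mem (hWF.1 g hg).1)
          have hne2 : mnOf g ≠ mnOf gb :=
            mnOf_ne_of_disjoint hWF.2 hg hgbc hggb (hWF.1 g hg).1 (mnOf_mem hgbne)
          rw [hR'y, hRy, if_neg (by rintro (h | h) <;> [exact hne1 h; exact hne2 h])]
      | none =>
        have hyuncov : ∀ g ∈ comps, y ∉ g := find?_none_iff.mp hfy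
        have hRy : repOf comps y = y := repOf_of_not_mem hyuncov
        rw [hRy]
        by_cases hy : y = a
        · subst hy
          rw [if_pos (Or.inl rfl)]
          rw [repOf_of_mem hWF'.2 hsmem ((hmem y).mpr (Or.inl rfl)), hmns]
        · have hynotgb : y ∉ gb := hyuncov gb hgbc
          have hne2 : y ≠ mnOf gb := fun h => hynotgb (h ▸ mnOf_mem hgbne)
          rw [if_neg (by rintro (h | h); exact hy h; exact hne2 h)]
          exact repOf_of_not_mem (by
            intro g hg
            rcases List.mem_append.mp hg with hg | hg
            · exact uncov_filter hyuncov g hg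
            · rcases List.mem_singleton.mp hg with rfl
              intro hys; rcases (hmem y).mp hys with h | h; exact hy h; exact hynotgb h)
  | some ga =>
    obtain ⟨hgac, haga⟩ := find?_some_facts hfa
    obtain ⟨hgane, hgand, hgaV⟩ := hWF.1 ga hgac
    have hra : repOf comps a = mnOf ga := repOf_of_mem hWF.2 hgac haga
    cases hfb : comps.find? (fun g => PySem.Set.contains g b) with
    | none =>
      -- b fresh, a in ga: replace ga by ga ∪ {b}
      have hbuncov : ∀ g ∈ comps, b ∉ g := find?_none_iff.mp hfb
      have hrb : repOf comps b = b := repOf_of_not_mem hbuncov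
      set s : List Char := PySem.Set.union ga (PySem.Set.ofList [b]) with hs
      have hmem : ∀ y, y ∈ s ↔ y ∈ ga ∨ y = b := by
        intro y; rw [hs, PySem.Set.mem_union, PySem.Set.mem_ofList]; simp
      have hkeep : ∀ g, g ∈ comps → (!(g == ga)) = true → Disj g s := by
        intro g hg hp c hcg hcs
        have hgne : g ≠ ga := by simpa using hp
        rcases (hmem c).mp hcs with hcga | rfl
        · exact (hWF.2.forall disj_symm hg hgac hgne) c hcg hcga
        · exact hbuncov g hg hcg
      have hWF' : CompsWF V (comps.filter (fun g => !(g == ga)) ++ [s]) :=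
        compsWF_filter_append hWF
          (List.ne_nil_of_mem ((hmem b).mpr (Or.inr rfl)))
          (by rw [hs]; exact PySem.Set.nodup_union _ _ hgand)
          (by intro c hc
              rcases (hmem c).mp hc with h | rfl
              · exact hgaV c h
              · exact hb)
          hkeep
      have hmns : mnOf s = min (mnOf ga) b := by
        apply mnOf_eq_of
        · rcases min_choice (mnOf ga) b with h | h <;> rw [h]
          · exact (hmem _).mpr (Or.inl (mnOf_mem hgane))
          · exact (hmem b).mpr (Or.inr rfl)
        · intro c hc; rcases (hmem c).mp hc with h | rfl
          · exact le_trans (min_le_left _ _) (mnOf_le h)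
          · exact min_le_right _ _
      have hsmem : s ∈ comps.filter (fun g => !(g == ga)) ++ [s] :=
        List.mem_append.mpr (Or.inr (List.mem_singleton.mpr rfl))
      refine ⟨hWF', ?_⟩
      intro y
      rw [hra, hrb]
      cases hfy : comps.find? (fun g => PySem.Set.contains g y) with
      | some g =>
        obtain ⟨hg, hyg⟩ := find?_some_facts hfy
        have hRy : repOf comps y = mnOf g := repOf_of_mem hWF.2 hg hyg
        by_cases hgga : g = ga
        · subst hgga
          rw [hRy, if_pos (Or.inl rfl)]
          rw [repOf_of_mem hWF'.2 hsmem ((hmem y).mpr (Or.inl hyg)), hmns]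
        · have hkeepg : g ∈ comps.filter (fun g => !(g == ga)) := by
            rw [List.mem_filter]; exact ⟨hg, by simpa using hgga⟩
          have hR'y : repOf (comps.filter (fun g => !(g == ga)) ++ [s]) y = mnOf g :=
            repOf_of_mem hWF'.2 (List.mem_append.mpr (Or.inl hkeepg)) hyg
          have hne1 : mnOf g ≠ mnOf ga :=
            mnOf_ne_of_disjoint hWF.2 hg hgac hgga (hWF.1 g hg).1 (mnOf_mem hgane)
          have hne2 : mnOf g ≠ b := fun h => hbuncov g hg (h ▸ mnOf_mem (hWF.1 g hg).1)
          rw [hR'y, hRy, if_neg (by rintro (h | h) <;> [exact hne1 h; exact hne2 h])]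
      | none =>
        have hyuncov : ∀ g ∈ comps, y ∉ g := find?_none_iff.mp hfy
        have hRy : repOf comps y = y := repOf_of_not_mem hyuncov
        rw [hRy]
        by_cases hy : y = b
        · subst hy
          rw [if_pos (Or.inr rfl)]
          rw [repOf_of_mem hWF'.2 hsmem ((hmem y).mpr (Or.inr rfl)), hmns]
        · have hynotga : y ∉ ga := hyuncov ga hgac
          have hne1 : y ≠ mnOf ga := fun h => hynotga (h ▸ mnOf_mem hgane)
          rw [if_neg (by rintro (h | h); exact hne1 h; exact hy h)]
          exact repOf_of_not_mem (by
            intro g hg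
            rcases List.mem_append.mp hg with hg | hg
            · exact uncov_filter hyuncov g hg
            · rcases List.mem_singleton.mp hg with rfl
              intro hys; rcases (hmem y).mp hys with h | h; exact hynotga h; exact hy h)
    | some gb =>
      obtain ⟨hgbc, hbgb⟩ := find?_some_facts hfb
      obtain ⟨hgbne, hgbnd, hgbV⟩ := hWF.1 gb hgbc
      have hrb : repOf comps b = mnOf gb := repOf_of_mem hWF.2 hgbc hbgb
      by_cases heq : ga = gb
      · subst heq
        dsimp only
        rw [if_pos rfl]
        refine ⟨hWF, ?_⟩
        intro y
        rw [hra, hrb, min_self]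
        by_cases hy : repOf comps y = mnOf ga
        · rw [if_pos (Or.inl hy), hy]
        · rw [if_neg (by rintro (h | h) <;> exact hy h)]
      · dsimp only
        rw [if_neg heq]
        set s : List Char := PySem.Set.union ga gb with hs
        have hmem : ∀ y, y ∈ s ↔ y ∈ ga ∨ y ∈ gb := by
          intro y; rw [hs, PySem.Set.mem_union]
        have hkeep : ∀ g, g ∈ comps → (!(g == ga || g == gb)) = true → Disj g s := by
          intro g hg hp c hcg hcs
          have hgne : g ≠ ga ∧ g ≠ gb := by simpa [not_or] using hp
          rcases (hmem c).mp hcs with hcga | hcgb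
          · exact (hWF.2.forall disj_symm hg hgac hgne.1) c hcg hcga
          · exact (hWF.2.forall disj_symm hg hgbc hgne.2) c hcg hcgb
        have hWF' : CompsWF V (comps.filter (fun g => !(g == ga || g == gb)) ++ [s]) :=
          compsWF_filter_append hWF
            (List.ne_nil_of_mem ((hmem a).mpr (Or.inl haga)))
            (by rw [hs]; exact PySem.Set.nodup_union _ _ hgand)
            (by intro c hc
                rcases (hmem c).mp hc with h | h
                · exact hgaV c h
                · exact hgbV c h)
            hkeep
        have hmns : mnOf s = min (mnOf ga) (mnOf gb) := by
          apply mnOf_eq_of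
          · rcases min_choice (mnOf ga) (mnOf gb) with h | h <;> rw [h]
            · exact (hmem _).mpr (Or.inl (mnOf_mem hgane))
            · exact (hmem _).mpr (Or.inr (mnOf_mem hgbne))
          · intro c hc; rcases (hmem c).mp hc with h | h
            · exact le_trans (min_le_left _ _) (mnOf_le h)
            · exact le_trans (min_le_right _ _) (mnOf_le h)
        have hsmem : s ∈ comps.filter (fun g => !(g == ga || g == gb)) ++ [s] :=
          List.mem_append.mpr (Or.inr (List.mem_singleton.mpr rfl))
        refine ⟨hWF', ?_⟩
        intro y
        rw [hra, hrb]
        cases hfy : comps.find? (fun g => PySem.Set.contains g y) with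
        | some g =>
          obtain ⟨hg, hyg⟩ := find?_some_facts hfy
          have hRy : repOf comps y = mnOf g := repOf_of_mem hWF.2 hg hyg
          by_cases hgga : g = ga
          · subst hgga
            rw [hRy, if_pos (Or.inl rfl)]
            rw [repOf_of_mem hWF'.2 hsmem ((hmem y).mpr (Or.inl hyg)), hmns]
          · by_cases hggb : g = gb
            · subst hggb
              rw [hRy, if_pos (Or.inr rfl)]
              rw [repOf_of_mem hWF'.2 hsmem ((hmem y).mpr (Or.inr hyg)), hmns]
            · have hkeepg : g ∈ comps.filter (fun g => !(g == ga || g == gb)) := by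
                rw [List.mem_filter]; exact ⟨hg, by simp [hgga, hggb]⟩
              have hR'y : repOf (comps.filter (fun g => !(g == ga || g == gb)) ++ [s]) y = mnOf g :=
                repOf_of_mem hWF'.2 (List.mem_append.mpr (Or.inl hkeepg)) hyg
              have hne1 : mnOf g ≠ mnOf ga :=
                mnOf_ne_of_disjoint hWF.2 hg hgac hgga (hWF.1 g hg).1 (mnOf_mem hgane)
              have hne2 : mnOf g ≠ mnOf gb :=
                mnOf_ne_of_disjoint hWF.2 hg hgbc hggb (hWF.1 g hg).1 (mnOf_mem hgbne)
              rw [hR'y, hRy, if_neg (by rintro (h | h) <;> [exact hne1 h; exact hne2 h])]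
        | none =>
          have hyuncov : ∀ g ∈ comps, y ∉ g := find?_none_iff.mp hfy
          have hRy : repOf comps y = y := repOf_of_not_mem hyuncov
          rw [hRy]
          have hne1 : y ≠ mnOf ga := fun h => hyuncov ga hgac (h ▸ mnOf_mem hgane)
          have hne2 : y ≠ mnOf gb := fun h => hyuncov gb hgbc (h ▸ mnOf_mem hgbne)
          rw [if_neg (by rintro (h | h); exact hne1 h; exact hne2 h)]
          exact repOf_of_not_mem (by
            intro g hg
            rcases List.mem_append.mp hg with hg | hg
            · exact uncov_filter hyuncov g hg
            · rcases List.mem_singleton.mp hg with rfl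
              intro hys
              rcases (hmem y).mp hys with h | h
              · exact hyuncov ga hgac h
              · exact hyuncov gb hgbc h)

lemma size_eq_keys_length (d : PySem.Dict Char Char) : d.size = d.keys.length := by
  simp [PySem.Dict.size, PySem.Dict.keys]

lemma SimInv_congr {V : List Char} {par : PySem.Dict Char Char} {c₁ c₂ : List (List Char)}
    (hR : ∀ y, repOf c₂ y = repOf c₁ y) (hWF : CompsWF V c₂) (h : SimInv V par c₁) :
    SimInv V par c₂ := by
  obtain ⟨hnd, hkeys, _, hcl⟩ := h
  refine ⟨hnd, hkeys, hWF, ?_⟩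
  intro x hx
  obtain ⟨h1, h2, h3, h4, h5⟩ := hcl x hx
  exact ⟨h1, by rw [hR, hR, h2], by rw [hR]; exact h3, h4, by rw [hR]; exact h5⟩

lemma SimInv_link {V : List Char} {par : PySem.Dict Char Char} {comps comps' : List (List Char)}
    {ra rb : Char}
    (h : SimInv V par comps) (hWF' : CompsWF V comps')
    (hchar : ∀ y, repOf comps' y =
      if repOf comps y = ra ∨ repOf comps y = rb then min ra rb else repOf comps y)
    (hraF : repOf comps ra = ra) (hrbF : repOf comps rb = rb)
    (hraV : ra ∈ V) (hrbV : rb ∈ V) (hne : ra ≠ rb) :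
    SimInv V (par.insert (max ra rb) (min ra rb)) comps' := by
  obtain ⟨hnd, hkeys, hWF, hcl⟩ := h
  set m := min ra rb with hm
  set M := max ra rb with hM
  have hMV : M ∈ V := by rcases max_choice ra rb with h | h <;> rw [hM, h] <;> assumption
  have hmV : m ∈ V := by rcases min_choice ra rb with h | h <;> rw [hm, h] <;> assumption
  have hmM : m < M := by
    rcases lt_or_gt_of_ne hne with h | h
    · rw [hm, hM, min_eq_left h.le, max_eq_right h.le]; exact h
    · rw [hm, hM, min_eq_right h.le, max_eq_left h.le]; exact h
  have hF : ∀ t, (if t = ra ∨ t = rb then m else t) ≤ t := by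
    intro t; split_ifs with h
    · rcases h with rfl | rfl; exact min_le_left _ _; exact min_le_right _ _
    · exact le_rfl
  have hcont : par.contains M = true := (PySem.Dict.contains_iff_mem_keys par M).mpr (hkeys ▸ hMV)
  refine ⟨hnd, by rw [PySem.Dict.keys_insert_of_contains par _ hcont, hkeys], hWF', ?_⟩
  intro y hy
  rw [PySem.Dict.getD_insert]
  by_cases hyM : y = M
  · subst hyM
    rw [if_pos rfl]
    have hRM : repOf comps M = M := by
      rcases max_choice ra rb with h | h <;> rw [hM, h] <;> assumption
    have hRm : repOf comps m = m := by
      rcases min_choice ra rb with h | h <;> rw [hm, h] <;> assumption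
    have hMor : M = ra ∨ M = rb := by
      rcases max_choice ra rb with h | h
      · exact Or.inl (hM ▸ h)
      · exact Or.inr (hM ▸ h)
    have hmor : m = ra ∨ m = rb := by
      rcases min_choice ra rb with h | h
      · exact Or.inl (hm ▸ h)
      · exact Or.inr (hm ▸ h)
    have hR'M : repOf comps' M = m := by rw [hchar, hRM, if_pos hMor]
    have hR'm : repOf comps' m = m := by rw [hchar, hRm, if_pos hmor]
    refine ⟨hmV, by rw [hR'm, hR'M], by rw [hR'M], hmM.le, ?_⟩
    constructor
    · intro h; exact absurd h (ne_of_lt hmM)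
    · intro h; rw [hR'M] at h; exact absurd h.symm (ne_of_lt hmM)
  · simp only [if_neg hyM]
    obtain ⟨h1, h2, h3, h4, h5⟩ := hcl y hy
    refine ⟨h1, by rw [hchar, hchar, h2], ?_, h4, ?_⟩
    · calc repOf comps' y ≤ repOf comps y := by rw [hchar]; exact hF _
        _ ≤ par.getD y y := h3
    · constructor
      · intro hpy
        have hyR : y = repOf comps y := h5.mp hpy
        rw [hchar, ← hyR]
        by_cases hyab : y = ra ∨ y = rb
        · rw [if_pos hyab]
          rcases hyab with rfl | rfl
          · rcases max_choice y rb with h | h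
            · exact absurd (hM ▸ h) (Ne.symm hyM)
            · rw [hm, min_eq_left]
              have := max_eq_right_iff.mp (hM ▸ h)
              exact this
          · rcases max_choice ra y with h | h
            · rw [hm, min_eq_right]
              exact max_eq_left_iff.mp (hM ▸ h)
            · exact absurd (hM ▸ h) (Ne.symm hyM)
        · rw [if_neg hyab]
      · intro hyR'
        rw [hchar] at hyR'
        by_cases hab : repOf comps y = ra ∨ repOf comps y = rb
        · rw [if_pos hab] at hyR'
          have hRm : repOf comps m = m := by
            rcases min_choice ra rb with h | h <;> rw [hm, h] <;> assumption
          have : y = repOf comps y := by rw [hyR', hRm]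
          exact h5.mpr this
        · rw [if_neg hab] at hyR'
          exact h5.mpr hyR'

lemma unionA_bstep {V : List Char} {comps : List (List Char)} {par : PySem.Dict Char Char}
    {a b : Char} (h : SimInv V par comps) (ha : a ∈ V) (hb : b ∈ V) :
    SimInv V (unionA (par.size + 1) par a b) (bstep comps a b) := by
  have hfuel : ∀ x : Char, cnt V x < par.size + 1 := by
    intro x
    rw [size_eq_keys_length, h.2.1]
    exact cnt_lt_fuel x
  obtain ⟨hWF', hchar⟩ := bstep_spec h.2.2.1 ha hb
  obtain ⟨hra, hInv1⟩ := findA_spec (par.size + 1) par a h ha (hfuel a)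
  obtain ⟨hrb, hInv2⟩ := findA_spec (par.size + 1) (findA (par.size + 1) par a).1 b hInv1 hb (hfuel b)
  unfold unionA
  dsimp only
  set ra := repOf comps a with hra'
  set rb := repOf comps b with hrb'
  rw [hra, hrb]
  by_cases heq : ra = rb
  · rw [if_pos heq]
    refine SimInv_congr ?_ hWF' hInv2
    intro y
    rw [hchar y, ← heq]
    by_cases hy : repOf comps y = ra
    · rw [if_pos (Or.inl hy), hy, min_self]
    · rw [if_neg (by rintro (h | h) <;> exact hy h)]
  · rw [if_neg heq]
    have hcommon :
        SimInv V ((findA (par.size + 1) (findA (par.size + 1) par a).1 b).1.insert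
          (max ra rb) (min ra rb)) (bstep comps a b) := by
      refine SimInv_link hInv2 hWF' (by intro y; rw [hchar y]) (repOf_idem h.2.2.1 a)
        (repOf_idem h.2.2.1 b) (repOf_mem_V h.2.2.1 ha) (repOf_mem_V h.2.2.1 hb) heq
    by_cases hlt : ra < rb
    · rw [if_pos hlt]
      rw [max_eq_right hlt.le, min_eq_left hlt.le] at hcommon
      exact hcommon
    · rw [if_neg hlt]
      have hgt : rb < ra := lt_of_le_of_ne (not_lt.mp hlt) (Ne.symm heq)
      rw [max_eq_left hgt.le, min_eq_right hgt.le] at hcommon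
      exact hcommon

lemma fold_range_two {σ : Type} (al bl : List Char) (h : al.length ≤ bl.length)
    (f : σ → Char → Char → σ) (init : σ) :
    (PySem.List.pyRange 0 al.length 1).foldl
      (fun s i => f s ((PySem.List.pyGet? al i).getD ' ') ((PySem.List.pyGet? bl i).getD ' ')) init
    = (al.zip bl).foldl (fun s e => f s e.1 e.2) init := by
  have key : ∀ k : Nat, k ≤ al.length →
      (PySem.List.pyRange 0 k 1).foldl
        (fun s i => f s ((PySem.List.pyGet? al i).getD ' ') ((PySem.List.pyGet? bl i).getD ' ')) init
      = ((al.zip bl).take k).foldl (fun s e => f s e.1 e.2) init := by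
    intro k
    induction k with
    | zero =>
      intro _
      rw [PySem.List.pyRange_one_eq_nil (by norm_num)]
      simp
    | succ k ih =>
      intro hk
      have hk' : k ≤ al.length := Nat.le_of_succ_le hk
      have hka : k < al.length := hk
      have hkb : k < bl.length := lt_of_lt_of_le hka h
      have hzlen : (al.zip bl).length = al.length := by
        rw [List.length_zip]; omega
      have hcast : ((k + 1 : Nat) : Int) = (k : Int) + 1 := by push_cast; ring
      rw [hcast, PySem.List.pyRange_one_succ_right (by positivity), List.foldl_append]
      rw [List.take_succ, List.foldl_append, ih hk']
      have hget : (al.zip bl)[k]? = some (al[k], bl[k]) := by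
        rw [List.getElem?_eq_getElem (by omega)]
        congr 1
        exact List.getElem_zip
      rw [hget]
      simp only [Option.toList_some, List.foldl_cons, List.foldl_nil]
      rw [PySem.List.pyGet?_natCast, PySem.List.pyGet?_natCast,
        List.getElem?_eq_getElem hka, List.getElem?_eq_getElem hkb]
      rfl
  have := key al.length le_rfl
  rwa [List.take_of_length_le (by rw [List.length_zip]; omega)] at this

lemma fold_range_one {σ : Type} (cl : List Char) (f : σ → Char → σ) (init : σ) :
    (PySem.List.pyRange 0 cl.length 1).foldl
      (fun s i => f s ((PySem.List.pyGet? cl i).getD ' ')) init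
    = cl.foldl f init := by
  have key : ∀ k : Nat, k ≤ cl.length →
      (PySem.List.pyRange 0 k 1).foldl
        (fun s i => f s ((PySem.List.pyGet? cl i).getD ' ')) init
      = (cl.take k).foldl f init := by
    intro k
    induction k with
    | zero =>
      intro _
      rw [PySem.List.pyRange_one_eq_nil (by norm_num)]
      simp
    | succ k ih =>
      intro hk
      have hk' : k ≤ cl.length := Nat.le_of_succ_le hk
      have hka : k < cl.length := hk
      have hcast : ((k + 1 : Nat) : Int) = (k : Int) + 1 := by push_cast; ring
      rw [hcast, PySem.List.pyRange_one_succ_right (by positivity), List.foldl_append]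
      rw [List.take_add_one, List.foldl_append, ih hk']
      rw [List.getElem?_eq_getElem hka]
      simp only [Option.toList_some, List.foldl_cons, List.foldl_nil]
      rw [PySem.List.pyGet?_natCast, List.getElem?_eq_getElem hka]
      rfl
  have := key cl.length le_rfl
  rwa [List.take_of_length_le le_rfl] at this

lemma step1A_inv0 {s : List Char × PySem.Dict Char Char} (h : Inv0 s) (c : Char) :
    Inv0 (step1A s c) ∧ s.1 ⊆ (step1A s c).1 ∧ c ∈ (step1A s c).1 := by
  obtain ⟨hnd, hkeys, hid⟩ := h
  unfold step1A
  by_cases hc : c ∈ s.1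
  · rw [if_pos hc]
    exact ⟨⟨hnd, hkeys, hid⟩, fun _ hx => hx, hc⟩
  · rw [if_neg hc]
    have hcont : s.2.contains c = false := by
      rcases hh : s.2.contains c with _ | _
      · rfl
      · exact absurd (hkeys ▸ (PySem.Dict.contains_iff_mem_keys s.2 c).mp hh) hc
    refine ⟨⟨?_, ?_, ?_⟩, ?_, ?_⟩
    · exact List.Nodup.append hnd (List.nodup_singleton c)
        (by simpa [List.disjoint_singleton] using hc)
    · rw [PySem.Dict.keys_insert_of_not_contains _ _ hcont, hkeys]
    · intro x hx
      rw [PySem.Dict.getD_insert]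
      rcases List.mem_append.mp hx with hx1 | hx1
      · rw [if_neg (by rintro rfl; exact hc hx1)]
        exact hid x hx1
      · rcases List.mem_singleton.mp hx1 with rfl
        rw [if_pos rfl]
    · exact fun _ hx => List.mem_append.mpr (Or.inl hx)
    · exact List.mem_append.mpr (Or.inr (List.mem_singleton.mpr rfl))

lemma loop1_fold_spec :
    ∀ (E : List (Char × Char)) (s : List Char × PySem.Dict Char Char), Inv0 s →
      Inv0 (E.foldl (fun s e => step1A (step1A s e.1) e.2) s) ∧
      s.1 ⊆ (E.foldl (fun s e => step1A (step1A s e.1) e.2) s).1 ∧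
      ∀ e ∈ E, e.1 ∈ (E.foldl (fun s e => step1A (step1A s e.1) e.2) s).1 ∧
               e.2 ∈ (E.foldl (fun s e => step1A (step1A s e.1) e.2) s).1 := by
  intro E
  induction E with
  | nil => intro s hs; exact ⟨hs, fun _ hx => hx, by simp⟩
  | cons e E ih =>
    intro s hs
    obtain ⟨h1, hsub1, hmem1⟩ := step1A_inv0 hs e.1
    obtain ⟨h2, hsub2, hmem2⟩ := step1A_inv0 h1 e.2
    obtain ⟨hInv, hsub, hmem⟩ := ih _ h2
    simp only [List.foldl_cons]
    refine ⟨hInv, fun _ hx => hsub (hsub2 (hsub1 hx)), ?_⟩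
    intro e' he'
    rcases List.mem_cons.mp he' with rfl | he'
    · exact ⟨hsub (hsub2 hmem1), hsub hmem2⟩
    · exact hmem e' he'

lemma loop2_fold_spec {V : List Char} :
    ∀ (E : List (Char × Char)) (par : PySem.Dict Char Char) (comps : List (List Char)),
      SimInv V par comps → (∀ e ∈ E, e.1 ∈ V ∧ e.2 ∈ V) →
      SimInv V (E.foldl (fun par e => unionA (par.size + 1) par e.1 e.2) par)
            (E.foldl (fun c e => bstep c e.1 e.2) comps) := by
  intro E
  induction E with
  | nil => intro par comps h _; exact h
  | cons e E ih =>
    intro par comps h hmem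
    simp only [List.foldl_cons]
    exact ih _ _ (unionA_bstep h (hmem e (by simp)).1 (hmem e (by simp)).2)
      (fun e' he' => hmem e' (List.mem_cons_of_mem _ he'))

lemma loop3_fold_spec {V : List Char} {comps : List (List Char)} :
    ∀ (cl : List Char) (par : PySem.Dict Char Char) (acc : List Char), SimInv V par comps →
      (cl.foldl (fun s c => step3A V s c) (par, acc)).2 = acc ++ cl.map (repOf comps) := by
  intro cl
  induction cl with
  | nil => intro par acc _; simp
  | cons c cl ih =>
    intro par acc hInv
    simp only [List.foldl_cons, List.map_cons]
    by_cases hc : c ∈ V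
    · have hfuel : cnt V c < par.size + 1 := by
        rw [size_eq_keys_length, hInv.2.1]; exact cnt_lt_fuel c
      obtain ⟨hval, hInv'⟩ := findA_spec (par.size + 1) par c hInv hc hfuel
      have hstep : step3A V (par, acc) c =
          ((findA (par.size + 1) par c).1, acc ++ [repOf comps c]) := by
        unfold step3A
        dsimp only
        rw [if_pos hc, hval]
      rw [hstep, ih _ _ hInv']
      simp
    · have hrep : repOf comps c = c := by
        apply repOf_of_not_mem
        intro g hg hcg
        exact hc ((hInv.2.2.1.1 g hg).2.2 c hcg)
      have hstep : step3A V (par, acc) c = (par, acc ++ [c]) := by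
        unfold step3A
        dsimp only
        rw [if_neg hc]
      rw [hstep, ih _ _ hInv, hrep]
      simp

lemma rep_inner_fold (g : List Char) (m : Char) :
    ∀ (rep : PySem.Dict Char Char) (c : Char),
      (g.foldl (fun rep ch => rep.insert ch m) rep).getD c c =
        if c ∈ g then m else rep.getD c c := by
  induction g with
  | nil => intro rep c; simp
  | cons x g ih =>
    intro rep c
    simp only [List.foldl_cons]
    rw [ih]
    by_cases hcg : c ∈ g
    · rw [if_pos hcg, if_pos (List.mem_cons_of_mem _ hcg)]
    · rw [if_neg hcg, PySem.Dict.getD_insert]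
      by_cases hcx : c = x
      · rw [if_pos hcx, if_pos (by rw [hcx]; exact List.mem_cons_self)]
      · rw [if_neg hcx, if_neg (by rintro h; rcases List.mem_cons.mp h with h | h
                                   exacts [hcx h, hcg h])]

lemma rep_fold_uncovered {comps : List (List Char)} {c : Char} (h : ∀ g ∈ comps, c ∉ g) :
    ∀ rep : PySem.Dict Char Char,
      (comps.foldl (fun rep g => g.foldl (fun rep ch => rep.insert ch (mnOf g)) rep) rep).getD c c
        = rep.getD c c := by
  induction comps with
  | nil => intro rep; simp
  | cons g comps ih =>
    intro rep
    simp only [List.foldl_cons]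
    rw [ih (fun g' hg' => h g' (List.mem_cons_of_mem _ hg')), rep_inner_fold,
      if_neg (h g List.mem_cons_self)]

lemma rep_fold_covered {comps : List (List Char)} (hdisj : comps.Pairwise Disj)
    {g : List Char} {c : Char} (hg : g ∈ comps) (hc : c ∈ g) :
    ∀ rep : PySem.Dict Char Char,
      (comps.foldl (fun rep g => g.foldl (fun rep ch => rep.insert ch (mnOf g)) rep) rep).getD c c
        = mnOf g := by
  induction comps with
  | nil => simp at hg
  | cons g' comps ih =>
    intro rep
    simp only [List.foldl_cons]
    rcases List.mem_cons.mp hg with rfl | hgtail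
    · have huncov : ∀ h ∈ comps, c ∉ h := by
        intro h hh
        exact (List.pairwise_cons.mp hdisj).1 h hh c hc
      rw [rep_fold_uncovered huncov, rep_inner_fold, if_pos hc]
    · exact ih (List.pairwise_cons.mp hdisj).2 hgtail _

lemma rep_getD {V : List Char} {comps : List (List Char)} (hWF : CompsWF V comps) (c : Char) :
    (comps.foldl (fun rep g => g.foldl (fun rep ch => rep.insert ch (mnOf g)) rep)
      PySem.Dict.empty).getD c c = repOf comps c := by
  unfold repOf
  cases hf : comps.find? (fun g => PySem.Set.contains g c) with
  | some g =>
    have hg := List.mem_of_find?_eq_some hf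
    have hc : c ∈ g := by simpa [PySem.Set.contains_iff] using List.find?_some hf
    rw [rep_fold_covered hWF.2 hg hc]
  | none =>
    have h : ∀ g ∈ comps, c ∉ g := by
      intro g hg hc
      have := List.find?_eq_none.mp hf g hg
      simp [PySem.Set.contains_iff] at this
      exact this hc
    rw [rep_fold_uncovered h, PySem.Dict.getD_empty]

lemma SimInv_init {s : List Char × PySem.Dict Char Char} (h : Inv0 s) : SimInv s.1 s.2 [] := by
  obtain ⟨hnd, hkeys, hid⟩ := h
  refine ⟨hnd, hkeys, ⟨by simp, List.Pairwise.nil⟩, ?_⟩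
  intro x hx
  have hrep : repOf [] x = x := repOf_of_not_mem (by simp)
  rw [hid x hx, hrep]
  exact ⟨hx, rfl, le_rfl, le_rfl, ⟨fun _ => rfl, fun _ => rfl⟩⟩

theorem main (A B C : String) (hPre : A.toList.length ≤ B.toList.length) :
    equivalent_letters A B C = equivalent_letters_alt A B C := by
  unfold equivalent_letters equivalent_letters_alt
  dsimp only
  set al := A.toList
  set bl := B.toList
  set cl := C.toList
  have h1 : loop1A al bl =
      (al.zip bl).foldl (fun s e => step1A (step1A s e.1) e.2) ([], PySem.Dict.empty) := by
    unfold loop1A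
    exact fold_range_two al bl hPre (fun s a b => step1A (step1A s a) b) _
  have hInv0 : Inv0 (([] : List Char), (PySem.Dict.empty : PySem.Dict Char Char)) :=
    ⟨List.nodup_nil, by simp [PySem.Dict.keys_empty], by simp⟩
  obtain ⟨hInvF, _, hmemF⟩ := loop1_fold_spec (al.zip bl) _ hInv0
  set sF := (al.zip bl).foldl (fun s e => step1A (step1A s e.1) e.2)
    (([] : List Char), (PySem.Dict.empty : PySem.Dict Char Char)) with hsF
  have h2 : loop2A al bl sF.2 =
      (al.zip bl).foldl (fun par e => unionA (par.size + 1) par e.1 e.2) sF.2 := by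
    unfold loop2A
    exact fold_range_two al bl hPre (fun par a b => unionA (par.size + 1) par a b) _
  set compsF := (al.zip bl).foldl (fun c e => bstep c e.1 e.2) ([] : List (List Char)) with hcompsF
  have hSim : SimInv sF.1
      ((al.zip bl).foldl (fun par e => unionA (par.size + 1) par e.1 e.2) sF.2) compsF :=
    loop2_fold_spec (al.zip bl) sF.2 [] (SimInv_init hInvF) hmemF
  set parF := (al.zip bl).foldl (fun par e => unionA (par.size + 1) par e.1 e.2) sF.2 with hparF
  have h3a : loop3A sF.1 cl parF = cl.foldl (fun s c => step3A sF.1 s c) (parF, []) :=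
    fold_range_one cl (fun s c => step3A sF.1 s c) (parF, [])
  have h3 : (loop3A (loop1A al bl).1 cl (loop2A al bl (loop1A al bl).2)).2 =
      cl.map (repOf compsF) := by
    rw [h1, h2, h3a, loop3_fold_spec cl parF [] hSim]
    simp
  rw [h3]
  have hrep : ∀ c : Char,
      (compsF.foldl (fun rep g =>
        g.foldl (fun rep ch => rep.insert ch ((PySem.List.min? g id).getD ' ')) rep)
        PySem.Dict.empty).getD c c = repOf compsF c :=
    fun c => rep_getD hSim.2.2.1 c
  congr 1
  rw [List.map_congr_left (fun ch _ => hrep ch)]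

-- ===== VERDICT (by name: the statement is the Claim_ definition above) =====
theorem equivalent_letters_spec : Claim_equal_equivalent_letters := by
  intro A B C _ hPre
  unfold Spec_equivalent_letters
  exact main A B C hPre
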